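-- pv_equiv track=rewrite | github.com/eholle123/advent-of-code-2023 | day9/part2.py | get_predicted_previous_values
-- ===== SOURCE A (Python) =====
-- from typing import List, Optional, Dict, Tuple, NewType
--
-- def make_sequence_tree(sequence: List[int]) -> List[List[int]]:
--     sequence_tree = [sequence]
--     while (all([num==0 for num in sequence]) is False) and len(sequence) > 1:
--         sub_sequence = get_sub_sequence(sequence)
--         sequence_tree.append(sub_sequence)
--         sequence = sub_sequence
--     sequence_tree = sequence_tree[-1::-1]
--     return sequence_tree
--
-- def get_sub_sequence(sequence: List[int]) -> List[int]:
--     return [(sequence[i+1] - sequence[i]) for i, num in enumerate(sequence) if i+1 != len(sequence)]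
--
-- def predict_previous_value_in_sequence(sequence_tree: List[List[int]], first_value: int) -> List[List[int]]:
--     previous_value = 0
--     for sequence in sequence_tree:
--         previous_value = sequence[0] - (first_value)
--         sequence.insert(0, previous_value)
--         first_value = sequence[0]
--     return sequence_tree
--
-- def get_predicted_previous_values(oasis_and_sand_sensor_data: List[List[int]]) -> List[int]:
--     predicted_values = []
--     for sequence in oasis_and_sand_sensor_data:
--         sequence_tree = make_sequence_tree(sequence)
--         sequence_tree = predict_previous_value_in_sequence(sequence_tree, 0)
--         previous_value = sequence_tree[-1][0]
--         predicted_values.append(previous_value)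
--     return predicted_values
-- ===== SOURCE B (Python) =====
-- def get_predicted_previous_values(oasis_and_sand_sensor_data):
--     # Closed form: backward-extrapolated value = sum_j (-1)^j * C(n, j+1) * s[j]
--     predicted_values = []
--     for sequence in oasis_and_sand_sensor_data:
--         n = len(sequence)
--         total = 0
--         c = n          # C(n, 1)
--         sign = 1
--         for j, x in enumerate(sequence):
--             total += sign * c * x
--             c = c * (n - j - 1) // (j + 2)   # C(n, j+2)
--             sign = -sign
--         predicted_values.append(total)
--     return predicted_values
-- ===== Notes on version B (the rewrite author's own statement) =====
-- stated objective: faster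
-- what changed: Replaces the per-sequence difference-table construction and backward fold with the closed-form alternating binomial combination sum_j (-1)^j*C(n,j+1)*s[j], computed in one pass with an iteratively updated binomial coefficient.
import Mathlib
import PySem

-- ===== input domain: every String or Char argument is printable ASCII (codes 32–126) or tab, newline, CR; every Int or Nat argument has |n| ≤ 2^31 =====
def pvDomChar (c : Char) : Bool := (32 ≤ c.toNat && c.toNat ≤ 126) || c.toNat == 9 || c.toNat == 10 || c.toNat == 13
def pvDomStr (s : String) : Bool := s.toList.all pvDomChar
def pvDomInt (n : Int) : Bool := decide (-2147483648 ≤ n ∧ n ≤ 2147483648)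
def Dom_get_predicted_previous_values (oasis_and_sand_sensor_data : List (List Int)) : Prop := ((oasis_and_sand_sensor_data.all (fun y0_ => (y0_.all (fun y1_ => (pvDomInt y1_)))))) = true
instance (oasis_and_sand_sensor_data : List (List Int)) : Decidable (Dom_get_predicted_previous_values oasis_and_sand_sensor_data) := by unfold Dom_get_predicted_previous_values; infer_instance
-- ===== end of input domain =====

-- B replaces A's difference-table build + backward fold by the closed-form alternating
-- binomial sum; proved equal on the return value only (the Python A mutates the input's
-- inner lists in place via list.insert; B does not).

-- ===== PORT A =====

-- [(sequence[i+1] - sequence[i]) for i, num in enumerate(sequence) if i+1 != len(sequence)]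
-- (the kept indices satisfy i+1 < len, so pyGet? is always some; .getD 0 is never the default)
def get_sub_sequence (sequence : List Int) : List Int :=
  ((PySem.List.enumerate sequence).filter (fun p => p.1 + 1 != (sequence.length : Int))).map
    (fun p => (PySem.List.pyGet? sequence (p.1 + 1)).getD 0 -
              (PySem.List.pyGet? sequence p.1).getD 0)

-- the filter keeps exactly the entries of all but the last position
theorem pv_filter_enum (s : List Int) :
    (PySem.List.enumerate s).filter (fun p => p.1 + 1 != (s.length : Int))
      = PySem.List.enumerate s.dropLast := by
  rcases List.eq_nil_or_concat s with rfl | ⟨l, a, rfl⟩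
  · simp [PySem.List.enumerate_nil]
  · rw [List.concat_eq_append, PySem.List.enumerate_append, List.filter_append]
    have h1 : (PySem.List.enumerate l).filter (fun p => p.1 + 1 != ((l ++ [a]).length : Int))
        = PySem.List.enumerate l := by
      apply List.filter_eq_self.mpr
      intro p hp
      rcases (PySem.List.mem_enumerate_iff _ _ _).mp hp with ⟨k, hk, rfl⟩
      simp only [bne_iff_ne, ne_eq, List.length_append, List.length_cons, List.length_nil]
      push_cast
      omega
    have h2 : (PySem.List.enumerate [a] (0 + (l.length : Int))).filter
        (fun p => p.1 + 1 != ((l ++ [a]).length : Int)) = [] := by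
      rw [PySem.List.enumerate_cons, PySem.List.enumerate_nil]
      simp only [List.filter]
      have : ((0 : Int) + l.length + 1 != ((l ++ [a]).length : Int)) = false := by
        simp only [bne_eq_false_iff_eq, List.length_append, List.length_cons, List.length_nil]
        push_cast; ring
      rw [this]
    rw [h1, h2, List.append_nil, List.dropLast_concat]

theorem pv_subseq_len (s : List Int) : (get_sub_sequence s).length = s.length - 1 := by
  rw [get_sub_sequence, pv_filter_enum]
  simp [PySem.List.length_enumerate]

-- while (all([num==0 for num in sequence]) is False) and len(sequence) > 1: ...
def make_sequence_tree_loop (sequence : List Int) (sequence_tree : List (List Int)) :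
    List (List Int) :=
  if (sequence.all (fun num => num == 0)) = false ∧ 1 < sequence.length then
    let sub_sequence := get_sub_sequence sequence
    make_sequence_tree_loop sub_sequence (sequence_tree ++ [sub_sequence])
  else sequence_tree
termination_by sequence.length
decreasing_by
  have := pv_subseq_len sequence
  omega

def make_sequence_tree (sequence : List Int) : List (List Int) :=
  -- sequence_tree[-1::-1]  (step -1 slice)
  (PySem.List.slice? (make_sequence_tree_loop sequence [sequence]) (some (-1)) none (-1)).getD []

-- sequence[0] is ported as (pyGet? sequence 0).getD 0: Python raises IndexError on an
-- empty level, which happens exactly for an empty input sequence — excluded by Pre_.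
def predict_previous_value_in_sequence (sequence_tree : List (List Int)) (first_value : Int) :
    List (List Int) :=
  match sequence_tree with
  | [] => []
  | sequence :: rest =>
    let previous_value := (PySem.List.pyGet? sequence 0).getD 0 - first_value
    let sequence := PySem.List.insert sequence 0 previous_value
    sequence :: predict_previous_value_in_sequence rest ((PySem.List.pyGet? sequence 0).getD 0)

def get_predicted_previous_values (oasis_and_sand_sensor_data : List (List Int)) : List Int :=
  oasis_and_sand_sensor_data.foldl (fun predicted_values sequence =>
    let sequence_tree := make_sequence_tree sequence
    let sequence_tree := predict_previous_value_in_sequence sequence_tree 0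
    let previous_value :=
      (PySem.List.pyGet? ((PySem.List.pyGet? sequence_tree (-1)).getD []) 0).getD 0
    predicted_values ++ [previous_value]) []

-- ===== PORT B =====

-- state (total, c, sign); one step of B's inner loop over enumerate(sequence)
def altStep (n : Int) (st : Int × Int × Int) (jx : Int × Int) : Int × Int × Int :=
  (st.1 + st.2.2 * st.2.1 * jx.2,
   PySem.Int.floordiv (st.2.1 * (n - jx.1 - 1)) (jx.1 + 2),
   -st.2.2)

def get_predicted_previous_values_alt (oasis_and_sand_sensor_data : List (List Int)) : List Int :=
  oasis_and_sand_sensor_data.foldl (fun predicted_values sequence =>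
    let n : Int := sequence.length
    let st := (PySem.List.enumerate sequence).foldl (altStep n) (0, n, 1)
    predicted_values ++ [st.1]) []

-- ===== PRECONDITION & SPEC =====
-- Pre_ excludes inputs containing an empty inner list: there the Python A raises
-- IndexError (sequence[0] on the empty level).
def Pre_get_predicted_previous_values (oasis_and_sand_sensor_data : List (List Int)) : Prop :=
  ∀ s ∈ oasis_and_sand_sensor_data, s ≠ []
instance (oasis_and_sand_sensor_data : List (List Int)) : Decidable (Pre_get_predicted_previous_values oasis_and_sand_sensor_data) := by unfold Pre_get_predicted_previous_values; infer_instance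

def pvWitness_get_predicted_previous_values : List (List Int) := [[1, 2, 3], [10, 13, 16, 21, 30, 45]]

def Spec_get_predicted_previous_values (oasis_and_sand_sensor_data : List (List Int)) (out : List Int) : Prop := out = get_predicted_previous_values_alt oasis_and_sand_sensor_data
instance (oasis_and_sand_sensor_data : List (List Int)) (out : List Int) : Decidable (Spec_get_predicted_previous_values oasis_and_sand_sensor_data out) := by unfold Spec_get_predicted_previous_values; infer_instance

-- ===== CLAIM (what is proved, stated in full; the proofs are below) =====
def Claim_equal_get_predicted_previous_values : Prop := ∀ (oasis_and_sand_sensor_data : List (List Int)), Dom_get_predicted_previous_values oasis_and_sand_sensor_data → Pre_get_predicted_previous_values oasis_and_sand_sensor_data → Spec_get_predicted_previous_values oasis_and_sand_sensor_data (get_predicted_previous_values oasis_and_sand_sensor_data)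

-- ===== LEMMAS AND PROOFS =====

-- the difference list: (Dif s)[j] = s[j+1] - s[j]
def Dif (s : List Int) : List Int := List.zipWith (fun b a => b - a) s.tail s

-- the closed-form value B computes: sum_j (-1)^j * C(n, j+1) * s[j]
def bsum (s : List Int) : Int :=
  ∑ j ∈ Finset.range s.length,
    (-1 : Int) ^ j * (Nat.choose s.length (j + 1) : Int) * s.getD j 0

def condA (s : List Int) : Prop := (s.all (fun num => num == 0)) = false ∧ 1 < s.length

-- the list of strictly deeper levels A's while-loop appends
def levelsA (s : List Int) : List (List Int) :=
  if h : (s.all (fun num => num == 0)) = false ∧ 1 < s.length then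
    get_sub_sequence s :: levelsA (get_sub_sequence s)
  else []
termination_by s.length
decreasing_by
  have := pv_subseq_len s
  have h2 := h.2
  omega

-- A's reversed tree
def TA (s : List Int) : List (List Int) := (s :: levelsA s).reverse

-- the backward fold A's predict loop performs, keeping only the running value
def fvout : List (List Int) → Int → Int
  | [], fv => fv
  | q :: rest, fv => fvout rest (q.headD 0 - fv)

theorem pv_difflen (s : List Int) : (Dif s).length = s.length - 1 := by
  simp [Dif]

theorem pv_dif_getElem (s : List Int) (j : Nat) (h : j < s.length - 1) :
    (Dif s)[j]'(by rw [pv_difflen]; exact h) = s[j+1]'(by omega) - s[j]'(by omega) := by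
  simp [Dif, List.getElem_tail]

theorem pv_subseq_eq (s : List Int) : get_sub_sequence s = Dif s := by
  rw [get_sub_sequence, pv_filter_enum]
  apply List.ext_getElem
  · simp [PySem.List.length_enumerate, Dif]
  · intro k h1 h2
    have hk : k < s.length - 1 := by
      simpa [PySem.List.length_enumerate] using h1
    rw [List.getElem_map, PySem.List.getElem_enumerate]
    simp only [Dif, List.getElem_zipWith, List.getElem_tail]
    have e1 : ((0 : Int) + (k : Int) + 1) = ((k + 1 : Nat) : Int) := by push_cast; ring
    have e0 : ((0 : Int) + (k : Int)) = ((k : Nat) : Int) := by omega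
    rw [e1, e0, PySem.List.pyGet?_natCast, PySem.List.pyGet?_natCast]
    rw [List.getElem?_eq_getElem (by omega), List.getElem?_eq_getElem (by omega)]
    rfl

theorem pv_mkloop_eq : ∀ (n : Nat) (s : List Int), s.length ≤ n → ∀ acc,
    make_sequence_tree_loop s acc = acc ++ levelsA s := by
  intro n
  induction n with
  | zero =>
    intro s hs acc
    rw [make_sequence_tree_loop, levelsA]
    rw [if_neg (fun hcon => absurd hcon.2 (by omega)),
        dif_neg (fun hcon : ((s.all fun num => num == 0) = false ∧ 1 < s.length) => absurd hcon.2 (by omega))]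
    simp
  | succ n ih =>
    intro s hs acc
    rw [make_sequence_tree_loop, levelsA]
    by_cases hc : condA s
    · have hc' : (s.all fun num => num == 0) = false ∧ 1 < s.length := hc
      rw [if_pos hc', dif_pos hc']
      rw [ih (get_sub_sequence s) (by have := pv_subseq_len s; omega)]
      simp
    · have hc' : ¬((s.all fun num => num == 0) = false ∧ 1 < s.length) := hc
      rw [if_neg hc', dif_neg hc']
      simp

theorem pv_slice_rev {α : Type} (xs : List α) :
    PySem.List.slice? xs (some (-1)) none (-1) = some xs.reverse := by
  have h := PySem.List.slice?_none_none_neg_one (xs := xs)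
  rw [← h]
  cases xs with
  | nil => rfl
  | cons a t => simp [PySem.List.slice?, PySem.List.sliceIndices]

theorem pv_mst_eq (s : List Int) : make_sequence_tree s = TA s := by
  rw [make_sequence_tree, pv_mkloop_eq s.length s le_rfl, pv_slice_rev]
  simp [TA]

theorem pv_pg0 (q : List Int) : (PySem.List.pyGet? q 0).getD 0 = q.headD 0 := by
  cases q <;> simp [PySem.List.pyGet?_zero]

theorem pv_insert_zero (q : List Int) (x : Int) : PySem.List.insert q 0 x = x :: q := by
  simp [pysem]

theorem pv_predict_ne_nil (tree : List (List Int)) (fv : Int) (h : tree ≠ []) :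
    predict_previous_value_in_sequence tree fv ≠ [] := by
  cases tree with
  | nil => exact absurd rfl h
  | cons q rest => simp [predict_previous_value_in_sequence]

theorem pv_getLast?_cons {α : Type} (a : α) (l : List α) (h : l ≠ []) :
    (a :: l).getLast? = l.getLast? := by
  cases l with
  | nil => exact absurd rfl h
  | cons b t => simp [List.getLast?_cons_cons]

theorem pv_predict_last : ∀ (tree : List (List Int)) (fv : Int), tree ≠ [] →
    (PySem.List.pyGet?
      ((PySem.List.pyGet? (predict_previous_value_in_sequence tree fv) (-1)).getD []) 0).getD 0
      = fvout tree fv := by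
  intro tree
  induction tree with
  | nil => intro fv h; exact absurd rfl h
  | cons q rest ih =>
    intro fv _
    simp only [predict_previous_value_in_sequence, pv_insert_zero,
      PySem.List.pyGet?_zero_cons, Option.getD_some]
    cases rest with
    | nil =>
      simp only [predict_previous_value_in_sequence]
      rw [PySem.List.pyGet?_neg_one]
      simp [fvout, pv_pg0]
    | cons r rs =>
      rw [PySem.List.pyGet?_neg_one,
        pv_getLast?_cons _ _ (pv_predict_ne_nil (r :: rs) _ (by simp)),
        ← PySem.List.pyGet?_neg_one, ih _ (by simp)]
      simp [fvout, pv_pg0]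

theorem pv_fvout_append (l l' : List (List Int)) (fv : Int) :
    fvout (l ++ l') fv = fvout l' (fvout l fv) := by
  induction l generalizing fv with
  | nil => rfl
  | cons q rest ih => simp [fvout, ih]

theorem pv_headD_eq_getD (s : List Int) : s.headD 0 = s.getD 0 0 := by
  cases s <;> rfl

-- the Pascal-recurrence step of the closed form, as a pure sum identity
theorem pv_sum_pascal (m : Nat) (g : Nat → Int) :
    ∑ j ∈ Finset.range (m + 1), (-1 : Int) ^ j * (Nat.choose (m + 1) (j + 1) : Int) * g j
      = g 0 - ∑ j ∈ Finset.range m, (-1 : Int) ^ j * (Nat.choose m (j + 1) : Int) * (g (j + 1) - g j) := by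
  have step1 : ∑ j ∈ Finset.range (m + 1), (-1 : Int) ^ j * (Nat.choose (m + 1) (j + 1) : Int) * g j
      = ∑ j ∈ Finset.range (m + 1), ((-1 : Int) ^ j * (Nat.choose m j : Int) * g j
          + (-1 : Int) ^ j * (Nat.choose m (j + 1) : Int) * g j) := by
    refine Finset.sum_congr rfl (fun j _ => ?_)
    rw [Nat.choose_succ_succ]
    push_cast
    ring
  rw [step1, Finset.sum_add_distrib]
  rw [Finset.sum_range_succ (f := fun j => (-1 : Int) ^ j * (Nat.choose m (j + 1) : Int) * g j)]
  rw [Finset.sum_range_succ' (f := fun j => (-1 : Int) ^ j * (Nat.choose m j : Int) * g j)]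
  rw [Nat.choose_succ_self]
  have key : ∑ j ∈ Finset.range m, (-1 : Int) ^ (j + 1) * (Nat.choose m (j + 1) : Int) * g (j + 1)
       + ∑ j ∈ Finset.range m, (-1 : Int) ^ j * (Nat.choose m (j + 1) : Int) * g j
      = - ∑ j ∈ Finset.range m, (-1 : Int) ^ j * (Nat.choose m (j + 1) : Int) * (g (j + 1) - g j) := by
    rw [← Finset.sum_add_distrib, ← Finset.sum_neg_distrib]
    refine Finset.sum_congr rfl (fun j _ => ?_)
    rw [pow_succ]
    ring
  simp only [pow_zero, Nat.choose_zero_right, Nat.cast_one, one_mul, Nat.cast_zero,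
    mul_zero, zero_mul, add_zero]
  linarith [key]

theorem pv_key (s : List Int) (h : s ≠ []) :
    bsum s = s.getD 0 0 - bsum (Dif s) := by
  obtain ⟨m, hm⟩ : ∃ m, s.length = m + 1 :=
    ⟨s.length - 1, by cases s with | nil => exact absurd rfl h | cons a t => simp⟩
  unfold bsum
  rw [hm, pv_difflen s, hm]
  simp only [Nat.add_sub_cancel]
  rw [pv_sum_pascal m (fun j => s.getD j 0)]
  congr 1
  refine Finset.sum_congr rfl (fun j hj => ?_)
  have hjm : j < m := Finset.mem_range.mp hj
  have h1 : (Dif s).getD j 0 = (Dif s)[j]'(by rw [pv_difflen]; omega) :=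
    List.getD_eq_getElem _ _ _
  have h2 : s.getD (j+1) 0 = s[j+1]'(by omega) := List.getD_eq_getElem _ _ _
  have h3 : s.getD j 0 = s[j]'(by omega) := List.getD_eq_getElem _ _ _
  rw [h1, pv_dif_getElem s j (by omega), ← h2, ← h3]

theorem pv_levelsA_pos (s : List Int) (hc : condA s) :
    levelsA s = get_sub_sequence s :: levelsA (get_sub_sequence s) := by
  rw [levelsA,
    dif_pos (show ((s.all fun num => num == 0) = false ∧ 1 < s.length) from hc)]

theorem pv_levelsA_neg (s : List Int) (hc : ¬ condA s) : levelsA s = [] := by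
  rw [levelsA,
    dif_neg (fun hr : ((s.all fun num => num == 0) = false ∧ 1 < s.length) => hc hr)]

theorem pv_TA_cond (s : List Int) (hc : condA s) :
    TA s = TA (get_sub_sequence s) ++ [s] := by
  unfold TA
  rw [pv_levelsA_pos s hc]
  simp

theorem pv_bsum_zero (s : List Int) (hall : s.all (fun num => num == 0) = true) :
    bsum s = 0 := by
  unfold bsum
  refine Finset.sum_eq_zero (fun j hj => ?_)
  have hjm : j < s.length := Finset.mem_range.mp hj
  have : s.getD j 0 = s[j]'(by omega) := List.getD_eq_getElem _ _ _
  rw [this]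
  have hz := (List.all_eq_true.mp hall) _ (List.getElem_mem (l := s) (n := j) (h := by omega))
  simp only [beq_iff_eq] at hz
  rw [hz, mul_zero]

theorem pv_A_single : ∀ (n : Nat) (s : List Int), s.length ≤ n → s ≠ [] →
    fvout (TA s) 0 = bsum s := by
  intro n
  induction n with
  | zero =>
    intro s hs hne
    cases s with
    | nil => exact absurd rfl hne
    | cons a t => simp at hs
  | succ n ih =>
    intro s hs hne
    by_cases hc : condA s
    · rw [pv_TA_cond s hc, pv_fvout_append]
      have hlen := pv_subseq_len s
      have hd : get_sub_sequence s = Dif s := pv_subseq_eq s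
      have hc2 := hc.2
      have hdne : get_sub_sequence s ≠ [] := by
        have : (get_sub_sequence s).length ≠ 0 := by omega
        exact fun hnil => this (by rw [hnil]; rfl)
      rw [ih (get_sub_sequence s) (by omega) hdne]
      simp only [fvout, hd]
      rw [pv_key s hne, pv_headD_eq_getD]
    · unfold TA
      rw [pv_levelsA_neg s hc]
      simp only [List.reverse_singleton, fvout, sub_zero]
      rcases Decidable.em ((s.all fun num => num == 0) = true) with hall | hall
      · rw [pv_bsum_zero s hall]
        cases s with
        | nil => exact absurd rfl hne
        | cons a t =>
          have := (List.all_eq_true.mp hall) a (by simp)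
          simp only [beq_iff_eq] at this
          simp [this]
      · have h1 : s.length = 1 := by
          unfold condA at hc
          push Not at hc
          have hlt := hc (by simpa using hall)
          cases s with
          | nil => exact absurd rfl hne
          | cons a t => simp only [List.length_cons] at hlt ⊢; omega
        obtain ⟨x, rfl⟩ : ∃ x, s = [x] := by
          cases s with
          | nil => exact absurd rfl hne
          | cons a t =>
            cases t with
            | nil => exact ⟨a, rfl⟩
            | cons b u => simp at h1
        simp [bsum]

theorem pv_alt_loop (n : Nat) : ∀ (xs : List Int) (j0 : Nat) (total : Int),
    j0 + xs.length = n →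
    ((PySem.List.enumerate xs (j0 : Int)).foldl (altStep (n : Int))
        (total, (Nat.choose n (j0 + 1) : Int), (-1 : Int) ^ j0)).1
      = total + ∑ i ∈ Finset.range xs.length,
          (-1 : Int) ^ (j0 + i) * (Nat.choose n (j0 + i + 1) : Int) * xs.getD i 0 := by
  intro xs
  induction xs with
  | nil =>
    intro j0 total h
    simp [PySem.List.enumerate_nil]
  | cons x t ih =>
    intro j0 total h
    rw [PySem.List.enumerate_cons, List.foldl_cons]
    have hj0n : j0 < n := by simp at h; omega
    have hstep : altStep (n : Int) (total, (Nat.choose n (j0 + 1) : Int), (-1 : Int) ^ j0) ((j0 : Int), x)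
        = (total + (-1 : Int) ^ j0 * (Nat.choose n (j0 + 1) : Int) * x,
           (Nat.choose n (j0 + 2) : Int), (-1 : Int) ^ (j0 + 1)) := by
      unfold altStep
      simp only [Prod.mk.injEq]
      refine ⟨trivial, ?_, by rw [pow_succ]; ring⟩
      have hcast : (n : Int) - (j0 : Int) - 1 = ((n - (j0 + 1) : Nat) : Int) := by
        push_cast [Nat.cast_sub (by omega : j0 + 1 ≤ n)]; ring
      rw [hcast]
      have hch : (Nat.choose n (j0 + 1) : Int) * ((n - (j0 + 1) : Nat) : Int)
          = (Nat.choose n (j0 + 2) : Int) * ((j0 : Int) + 2) := by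
        have h0 := Nat.choose_succ_right_eq n (j0 + 1)
        have h1 : (Nat.choose n (j0 + 2) * (j0 + 2) : Nat) = (Nat.choose n (j0 + 1) * (n - (j0 + 1)) : Nat) := h0
        exact_mod_cast congrArg (fun z : Nat => (z : Int)) h1.symm
      rw [hch, PySem.Int.floordiv_eq_ediv_of_pos (by omega),
        Int.mul_ediv_cancel _ (by omega)]
    rw [hstep]
    have hc : ((j0 : Int) + 1) = ((j0 + 1 : Nat) : Int) := by push_cast; ring
    rw [hc, ih (j0 + 1) _ (by simp at h ⊢; omega)]
    rw [List.length_cons, Finset.sum_range_succ']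
    simp only [List.getD_cons_succ, List.getD_cons_zero, Nat.add_zero]
    have hre : ∑ i ∈ Finset.range t.length,
        (-1 : Int) ^ (j0 + 1 + i) * (Nat.choose n (j0 + 1 + i + 1) : Int) * t.getD i 0
      = ∑ i ∈ Finset.range t.length,
        (-1 : Int) ^ (j0 + (i + 1)) * (Nat.choose n (j0 + (i + 1) + 1) : Int) * t.getD i 0 := by
      refine Finset.sum_congr rfl (fun i _ => ?_)
      ring_nf
    rw [hre]
    ring

theorem pv_alt_single (s : List Int) :
    ((PySem.List.enumerate s).foldl (altStep (s.length : Int)) (0, (s.length : Int), 1)).1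
      = bsum s := by
  have h := pv_alt_loop s.length s 0 0 (by omega)
  simp only [Nat.cast_zero, pow_zero, Nat.choose_one_right, zero_add] at h
  unfold bsum
  exact h

-- ===== VERDICT (by name: the statement is the Claim_ definition above) =====
theorem get_predicted_previous_values_spec : Claim_equal_get_predicted_previous_values := by
  intro data _ hpre
  unfold Spec_get_predicted_previous_values
  unfold get_predicted_previous_values get_predicted_previous_values_alt
  rw [PySem.List.foldl_append_singleton_eq_map, PySem.List.foldl_append_singleton_eq_map,
    List.nil_append, List.nil_append]
  refine List.map_congr_left (fun s hs => ?_)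
  have hne : s ≠ [] := hpre s hs
  rw [pv_mst_eq s, pv_predict_last (TA s) 0 (by unfold TA; simp),
    pv_A_single s.length s le_rfl hne, pv_alt_single s]
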